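-- pv_equiv track=rewrite | github.com/myxu95/Immunex | immunex/analysis/interactions/occupancy_metrics.py | summarize_frames
-- ===== SOURCE A (Python) =====
-- from math import gcd
-- from typing import Iterable
--
-- def _infer_frame_step(frames: list[int]) -> int:
--     if len(frames) < 2:
--         return 1
--     diffs = [curr - prev for prev, curr in zip(frames, frames[1:]) if curr > prev]
--     if not diffs:
--         return 1
--     step = diffs[0]
--     for diff in diffs[1:]:
--         step = gcd(step, diff)
--     return max(step, 1)
--
-- def summarize_frames(frames_seen: Iterable[int]) -> dict[str, int | None]:
--     frames = sorted({int(frame) for frame in frames_seen})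
--     if not frames:
--         return {
--             "n_segments": 0,
--             "max_consecutive_frames": 0,
--             "first_frame": None,
--             "last_frame": None,
--         }
--     step = _infer_frame_step(frames)
--     n_segments = 1
--     current_run = 1
--     max_run = 1
--     for prev, curr in zip(frames, frames[1:]):
--         if curr - prev == step:
--             current_run += 1
--         else:
--             n_segments += 1
--             max_run = max(max_run, current_run)
--             current_run = 1
--     max_run = max(max_run, current_run)
--     return {
--         "n_segments": n_segments,
--         "max_consecutive_frames": max_run,
--         "first_frame": int(frames[0]),
--         "last_frame": int(frames[-1]),
--     }
-- ===== SOURCE B (Python) =====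
-- from math import gcd
-- from typing import Iterable
--
--
-- def _infer_frame_step(frames: list[int]) -> int:
--     if len(frames) < 2:
--         return 1
--     diffs = [curr - prev for prev, curr in zip(frames, frames[1:]) if curr > prev]
--     if not diffs:
--         return 1
--     step = diffs[0]
--     for diff in diffs[1:]:
--         step = gcd(step, diff)
--     return max(step, 1)
--
--
-- def summarize_frames(frames_seen: Iterable[int]) -> dict[str, int | None]:
--     s = {int(frame) for frame in frames_seen}
--     if not s:
--         return {
--             "n_segments": 0,
--             "max_consecutive_frames": 0,
--             "first_frame": None,
--             "last_frame": None,
--         }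
--     frames = sorted(s)
--     step = _infer_frame_step(frames)
--     # Segment detection by set membership (longest-consecutive-sequence style):
--     # every consecutive gap is a positive multiple of step, so f - step in s
--     # iff f - step is f's immediate predecessor, i.e. f starts a segment iff
--     # f - step not in s, and f ends one iff f + step not in s.  Pairing the
--     # i-th start with the i-th end, the segment holds exactly the arithmetic
--     # progression start, start+step, ..., end.
--     starts = [f for f in frames if f - step not in s]
--     ends = [f for f in frames if f + step not in s]
--     max_run = max((e - b) // step + 1 for b, e in zip(starts, ends))
--     return {
--         "n_segments": len(starts),
--         "max_consecutive_frames": max_run,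
--         "first_frame": int(frames[0]),
--         "last_frame": int(frames[-1]),
--     }
-- ===== Notes on version B (the rewrite author's own statement) =====
-- stated objective: alternative
-- what changed: Replaces A's running-counter scan over adjacent sorted pairs by set-membership segment detection: a frame starts a segment iff frame-step is not in the set and ends one iff frame+step is not in the set; n_segments is the number of starts and the max run length is computed arithmetically as (end-start)//step+1 over paired starts/ends, with no run counter at all.
import Mathlib
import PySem

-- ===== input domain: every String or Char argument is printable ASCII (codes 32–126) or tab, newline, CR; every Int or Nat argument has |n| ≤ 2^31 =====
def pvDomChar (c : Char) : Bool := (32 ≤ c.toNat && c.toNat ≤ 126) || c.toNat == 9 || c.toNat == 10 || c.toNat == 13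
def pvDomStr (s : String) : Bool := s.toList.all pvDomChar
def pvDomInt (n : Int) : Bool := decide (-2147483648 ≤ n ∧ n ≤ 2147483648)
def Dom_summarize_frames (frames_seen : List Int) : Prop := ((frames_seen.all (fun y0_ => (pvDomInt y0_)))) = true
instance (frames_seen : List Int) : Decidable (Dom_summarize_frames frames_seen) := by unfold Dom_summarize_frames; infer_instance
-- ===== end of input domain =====

-- B replaces A's running-counter scan over adjacent sorted pairs by set-membership segment
-- detection (a frame starts/ends a segment iff frame∓step is absent from the set) with the
-- run lengths computed arithmetically; same result, objective: alternative algorithm.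

-- ===== PORT A =====
-- shared helper: transliteration of _infer_frame_step (identical in Source A and Source B)
def pvInferFrameStep (frames : List Int) : Int :=
  if frames.length < 2 then 1
  else
    let diffs := ((frames.zip (frames.drop 1)).filter (fun pc => decide (pc.1 < pc.2))).map
      (fun pc => pc.2 - pc.1)
    match diffs with
    | [] => 1
    | d :: rest => max (rest.foldl (fun s diff => ((Int.gcd s diff : Nat) : Int)) d) 1

def summarize_frames (frames_seen : List Int) : List (String × Option Int) :=
  let frames := PySem.List.sorted (PySem.Set.ofList frames_seen) (fun x => x) false
  if frames.isEmpty then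
    [("n_segments", some 0), ("max_consecutive_frames", some 0),
     ("first_frame", none), ("last_frame", none)]
  else
    let step := pvInferFrameStep frames
    let st := (frames.zip (frames.drop 1)).foldl
      (fun (st : Int × Int × Int) pc =>
        if pc.2 - pc.1 = step then (st.1, st.2.1 + 1, st.2.2)
        else (st.1 + 1, 1, max st.2.2 st.2.1)) (1, 1, 1)
    let maxRun := max st.2.2 st.2.1
    [("n_segments", some st.1), ("max_consecutive_frames", some maxRun),
     ("first_frame", PySem.List.pyGet? frames 0), ("last_frame", PySem.List.pyGet? frames (-1))]

-- ===== PORT B =====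
def summarize_frames_alt (frames_seen : List Int) : List (String × Option Int) :=
  let s := PySem.Set.ofList frames_seen
  if s.isEmpty then
    [("n_segments", some 0), ("max_consecutive_frames", some 0),
     ("first_frame", none), ("last_frame", none)]
  else
    let frames := PySem.List.sorted s (fun x => x) false
    let step := pvInferFrameStep frames
    let starts := frames.filter (fun f => !(PySem.Set.contains s (f - step)))
    let ends := frames.filter (fun f => !(PySem.Set.contains s (f + step)))
    let runs := (starts.zip ends).map (fun be => PySem.Int.floordiv (be.2 - be.1) step + 1)
    [("n_segments", some (starts.length : Int)),
     ("max_consecutive_frames", PySem.List.max? runs (fun y => y)),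
     ("first_frame", PySem.List.pyGet? frames 0), ("last_frame", PySem.List.pyGet? frames (-1))]

-- ===== PRECONDITION & SPEC =====
def Spec_summarize_frames (frames_seen : List Int) (out : List (String × Option Int)) : Prop := out = summarize_frames_alt frames_seen
instance (frames_seen : List Int) (out : List (String × Option Int)) : Decidable (Spec_summarize_frames frames_seen out) := by unfold Spec_summarize_frames; infer_instance

-- ===== CLAIM (what is proved, stated in full; the proofs are below) =====
def Claim_equal_summarize_frames : Prop := ∀ (frames_seen : List Int), Dom_summarize_frames frames_seen → Spec_summarize_frames frames_seen (summarize_frames frames_seen)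

-- ===== LEMMAS AND PROOFS =====

-- list of run lengths of (prev :: rest), current run already has length cur (spec of A's loop)
def pvRunsAux (step prev cur : Int) : List Int → List Int
  | [] => [cur]
  | c :: rest => if c - prev = step then pvRunsAux step c (cur + 1) rest
                 else cur :: pvRunsAux step c 1 rest

-- list of (start, end) pairs of the maximal step-runs of (prev :: rest), current run started at start
def pvSegs (step start prev : Int) : List Int → List (Int × Int)
  | [] => [(start, prev)]
  | c :: rest => if c - prev = step then pvSegs step start c rest
                 else (start, prev) :: pvSegs step c c rest

theorem pvRunsAux_ne_nil (step prev cur : Int) (l : List Int) :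
    pvRunsAux step prev cur l ≠ [] := by
  induction l generalizing prev cur with
  | nil => simp [pvRunsAux]
  | cons c rest ih =>
    simp only [pvRunsAux]
    split
    · exact ih c (cur + 1)
    · simp

theorem pvRunsAux_headI (step prev cur : Int) (l : List Int) (h : 1 ≤ cur) :
    1 ≤ (pvRunsAux step prev cur l).headI := by
  induction l generalizing prev cur with
  | nil => simpa [pvRunsAux]
  | cons c rest ih =>
    simp only [pvRunsAux]
    split
    · exact ih c (cur + 1) (by omega)
    · simpa

-- A's fold over adjacent pairs, characterised through pvRunsAux
theorem pvLoopA (step : Int) (rest : List Int) : ∀ (prev n cur mx : Int),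
    ((prev :: rest).zip rest).foldl
      (fun (st : Int × Int × Int) pc =>
        if pc.2 - pc.1 = step then (st.1, st.2.1 + 1, st.2.2)
        else (st.1 + 1, 1, max st.2.2 st.2.1)) (n, cur, mx)
    = (n + ((pvRunsAux step prev cur rest).length : Int) - 1,
       (pvRunsAux step prev cur rest).getLastD 0,
       ((pvRunsAux step prev cur rest).dropLast).foldl max mx) := by
  induction rest with
  | nil => intro prev n cur mx; simp [pvRunsAux]
  | cons c rest ih =>
    intro prev n cur mx
    simp only [List.zip_cons_cons, List.foldl_cons, pvRunsAux]
    by_cases h : c - prev = step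
    · simp only [h]
      exact ih c n (cur + 1) mx
    · simp only [if_neg h]
      rw [ih c (n + 1) 1 (max mx cur)]
      have hne := pvRunsAux_ne_nil step c 1 rest
      refine Prod.ext ?_ (Prod.ext ?_ ?_)
      · simp; omega
      · simp only
        rw [List.getLastD_cons, List.getLastD_eq_getLast?, List.getLastD_eq_getLast?]
        cases hq : (pvRunsAux step c 1 rest).getLast? with
        | none => exact absurd (List.getLast?_eq_none_iff.mp hq) hne
        | some v => simp
      · simp only
        rw [List.dropLast_cons_of_ne_nil hne, List.foldl_cons]

-- run lengths are the arithmetic lengths of the segments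
theorem pvRunsAux_eq_segs (step : Int) (hs : 0 < step) (l : List Int) :
    ∀ (start prev cur : Int), prev = start + (cur - 1) * step →
    pvRunsAux step prev cur l
      = (pvSegs step start prev l).map (fun pr => PySem.Int.floordiv (pr.2 - pr.1) step + 1) := by
  induction l with
  | nil =>
    intro start prev cur hinv
    simp only [pvRunsAux, pvSegs, List.map_cons, List.map_nil]
    rw [PySem.Int.floordiv_eq_ediv_of_pos hs, hinv]
    have : start + (cur - 1) * step - start = (cur - 1) * step := by ring
    rw [this, Int.mul_ediv_cancel _ (ne_of_gt hs)]
    norm_num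
  | cons c rest ih =>
    intro start prev cur hinv
    simp only [pvRunsAux, pvSegs]
    by_cases h : c - prev = step
    · rw [if_pos h, if_pos h]
      exact ih start c (cur + 1) (by rw [show c = prev + step by omega, hinv]; ring)
    · rw [if_neg h, if_neg h]
      simp only [List.map_cons]
      congr 1
      · rw [PySem.Int.floordiv_eq_ediv_of_pos hs, hinv]
        have : start + (cur - 1) * step - start = (cur - 1) * step := by ring
        rw [this, Int.mul_ediv_cancel _ (ne_of_gt hs)]
        norm_num
      · exact ih c c 1 (by ring)

-- gcd fold divides its seed and every element
theorem pvGcdFoldDvd (ds : List Int) : ∀ (s : Int),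
    (ds.foldl (fun s diff => ((Int.gcd s diff : Nat) : Int)) s) ∣ s
    ∧ ∀ d ∈ ds, (ds.foldl (fun s diff => ((Int.gcd s diff : Nat) : Int)) s) ∣ d := by
  induction ds with
  | nil => intro s; exact ⟨dvd_refl s, by simp⟩
  | cons d ds ih =>
    intro s
    simp only [List.foldl_cons]
    obtain ⟨h1, h2⟩ := ih ((Int.gcd s d : Nat) : Int)
    refine ⟨h1.trans (Int.gcd_dvd_left s d), ?_⟩
    intro x hx
    rcases List.mem_cons.mp hx with h | h
    · exact h ▸ h1.trans (Int.gcd_dvd_right s d)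
    · exact h2 x h

theorem pvGcdFoldPos (ds : List Int) : ∀ (s : Int), 0 < s → (∀ d ∈ ds, 0 < d) →
    0 < ds.foldl (fun s diff => ((Int.gcd s diff : Nat) : Int)) s := by
  induction ds with
  | nil => intro s hs _; simpa
  | cons d ds ih =>
    intro s hs hd
    simp only [List.foldl_cons]
    refine ih _ ?_ (fun x hx => hd x (List.mem_cons_of_mem d hx))
    have : s ≠ 0 := ne_of_gt hs
    exact_mod_cast Nat.pos_of_ne_zero (fun h => this (Int.gcd_eq_zero_iff.mp h).1)

-- (p, c) adjacent in frames lands in the zip of frames with its tail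
theorem pvAdjZip (u : List Int) : ∀ (p c : Int) (v frames : List Int),
    frames = u ++ p :: c :: v → (p, c) ∈ frames.zip (frames.drop 1) := by
  induction u with
  | nil => intro p c v frames h; subst h; simp
  | cons a u ih =>
    intro p c v frames h
    subst h
    have := ih p c v (u ++ p :: c :: v) rfl
    rcases hu : u ++ p :: c :: v with _ | ⟨b, t⟩
    · simp at hu
    · rw [hu] at this
      simp only [List.cons_append, hu, List.drop_one, List.tail_cons, List.zip_cons_cons]
      exact List.mem_cons_of_mem _ (by simpa [List.drop_one] using this)

-- the inferred step is positive and divides every adjacent gap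
theorem pvStepFacts (frames : List Int) (hp : frames.Pairwise (· < ·)) :
    1 ≤ pvInferFrameStep frames
    ∧ ∀ u p c v, frames = u ++ p :: c :: v → pvInferFrameStep frames ∣ (c - p) := by
  unfold pvInferFrameStep
  by_cases hl : frames.length < 2
  · refine ⟨by simp [hl], ?_⟩
    intro u p c v h
    exfalso
    rw [h] at hl
    simp [List.length_append] at hl
    omega
  · simp only [if_neg hl]
    set diffs := ((frames.zip (frames.drop 1)).filter (fun pc => decide (pc.1 < pc.2))).map
      (fun pc => pc.2 - pc.1) with hdiffs
    have hpos : ∀ d ∈ diffs, 0 < d := by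
      intro d hd
      rw [hdiffs] at hd
      obtain ⟨pc, hpc, hval⟩ := List.mem_map.mp hd
      have := List.of_mem_filter hpc
      simp at this
      omega
    have hmem : ∀ u p c v, frames = u ++ p :: c :: v → (c - p) ∈ diffs := by
      intro u p c v h
      have hz := pvAdjZip u p c v frames h
      have hlt : p < c := by
        have := hp
        rw [h] at this
        have h2 := (List.pairwise_append.mp this).2.1
        exact (List.pairwise_cons.mp h2).1 c (by simp)
      rw [hdiffs]
      exact List.mem_map.mpr ⟨(p, c), List.mem_filter.mpr ⟨hz, by simpa⟩, rfl⟩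
    rcases hd : diffs with _ | ⟨d0, ds⟩
    · refine ⟨le_refl 1, ?_⟩
      intro u p c v h
      have := hmem u p c v h
      rw [hd] at this
      simp at this
    · obtain ⟨hdvd0, hdvdmem⟩ := pvGcdFoldDvd ds d0
      have hposf : 0 < ds.foldl (fun s diff => ((Int.gcd s diff : Nat) : Int)) d0 := by
        refine pvGcdFoldPos ds d0 ?_ ?_
        · exact hpos d0 (by rw [hd]; simp)
        · intro x hx; exact hpos x (by rw [hd]; exact List.mem_cons_of_mem _ hx)
      have hred : (match d0 :: ds with
          | [] => (1 : Int)
          | d :: rest => max (rest.foldl (fun s diff => ((Int.gcd s diff : Nat) : Int)) d) 1)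
          = max (ds.foldl (fun s diff => ((Int.gcd s diff : Nat) : Int)) d0) 1 := rfl
      refine ⟨by rw [hred]; omega, ?_⟩
      intro u p c v h
      rw [hred, show max (ds.foldl (fun s diff => ((Int.gcd s diff : Nat) : Int)) d0) 1
          = ds.foldl (fun s diff => ((Int.gcd s diff : Nat) : Int)) d0 by omega]
      have := hmem u p c v h
      rw [hd] at this
      rcases List.mem_cons.mp this with h' | h'
      · exact h' ▸ hdvd0
      · exact hdvdmem _ h'

-- in a strictly sorted list, the neighbour bounds of an adjacent pair
theorem pvPredBound (u : List Int) (p c : Int) (v : List Int) (x : Int)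
    (hp : (u ++ p :: c :: v).Pairwise (· < ·)) (hx : x ∈ u ++ p :: c :: v) (hlt : x < c) :
    x ≤ p := by
  obtain ⟨_, h2, h3⟩ := List.pairwise_append.mp hp
  rcases List.mem_append.mp hx with h | h
  · exact le_of_lt (h3 x h p (by simp))
  · rcases List.mem_cons.mp h with h | h
    · omega
    · rcases List.mem_cons.mp h with h | h
      · omega
      · have := (List.pairwise_cons.mp (List.pairwise_cons.mp h2).2).1 x h
        omega

theorem pvSuccBound (u : List Int) (p c : Int) (v : List Int) (x : Int)
    (hp : (u ++ p :: c :: v).Pairwise (· < ·)) (hx : x ∈ u ++ p :: c :: v) (hgt : p < x) :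
    c ≤ x := by
  obtain ⟨_, h2, h3⟩ := List.pairwise_append.mp hp
  rcases List.mem_append.mp hx with h | h
  · have := h3 x h p (by simp); omega
  · rcases List.mem_cons.mp h with h | h
    · omega
    · rcases List.mem_cons.mp h with h | h
      · omega
      · have := (List.pairwise_cons.mp (List.pairwise_cons.mp h2).2).1 x h
        omega

-- membership chain: for each adjacent pair (p, c) of frames, c-step ∈ frames ↔ p+step ∈ frames ↔ gap = step
theorem pvChainMk (S : List Int) (step : Int) (hstep : 1 ≤ step) (hp : S.Pairwise (· < ·))
    (hdvd : ∀ u p c v, S = u ++ p :: c :: v → step ∣ (c - p)) :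
    ∀ (l u : List Int) (prev : Int), S = u ++ prev :: l →
      List.Chain (fun p c => (((c - step) ∈ S) ↔ c - p = step)
        ∧ (((p + step) ∈ S) ↔ c - p = step)) prev l := by
  intro l
  induction l with
  | nil => intro u prev h; exact List.Chain.nil
  | cons c rest ih =>
    intro u prev h
    have hlt : prev < c := by
      have := hp; rw [h] at this
      have h2 := (List.pairwise_append.mp this).2.1
      exact (List.pairwise_cons.mp h2).1 c (by simp)
    have hgap : step ∣ (c - prev) := hdvd u prev c rest h
    have hge : step ≤ c - prev := Int.le_of_dvd (by omega) hgap
    have hpmem : prev ∈ S := by rw [h]; simp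
    have hcmem : c ∈ S := by rw [h]; simp
    refine List.Chain.cons ⟨?_, ?_⟩ (ih (u ++ [prev]) c (by rw [h]; simp))
    · constructor
      · intro hm
        have := pvPredBound u prev c rest (c - step) (h ▸ hp) (h ▸ hm) (by omega)
        omega
      · intro he
        have : c - step = prev := by omega
        rwa [this]
    · constructor
      · intro hm
        have := pvSuccBound u prev c rest (prev + step) (h ▸ hp) (h ▸ hm) (by omega)
        omega
      · intro he
        have : prev + step = c := by omega
        rwa [this]

-- every member of a strictly sorted list is at most its last element
theorem pvLeLast (l : List Int) : ∀ (x : Int), l.Pairwise (· < ·) → x ∈ l →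
    x ≤ l.getLastD 0 := by
  induction l with
  | nil => simp
  | cons a t ih =>
    intro x hp hx
    rcases t with _ | ⟨b, t'⟩
    · simp at hx; simp [hx]
    · have hd : (a :: b :: t').getLastD 0 = (b :: t').getLastD 0 := by
        rw [List.getLastD_cons, List.getLastD_eq_getLast?, List.getLastD_eq_getLast?,
          List.getLast?_eq_getLast_of_ne_nil (by simp : b :: t' ≠ [])]
        simp
      rw [hd]
      rcases List.mem_cons.mp hx with h | h
      · subst h
        have hb := (List.pairwise_cons.mp hp).1 b (by simp)
        have := ih b (List.pairwise_cons.mp hp).2 (by simp)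
        omega
      · exact ih x (List.pairwise_cons.mp hp).2 h

-- B's starts filter, through pvSegs
theorem pvStartsFilter (S : List Int) (step : Int) (l : List Int) :
    ∀ (start prev : Int),
    List.Chain (fun p c => (((c - step) ∈ S) ↔ c - p = step)) prev l →
    start :: l.filter (fun f => !(decide ((f - step) ∈ S)))
      = (pvSegs step start prev l).map Prod.fst := by
  induction l with
  | nil => intro start prev _; simp [pvSegs]
  | cons c rest ih =>
    intro start prev hch
    obtain ⟨hR, hch'⟩ := List.chain_cons.mp hch
    simp only [pvSegs, List.filter_cons]
    by_cases h : c - prev = step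
    · rw [if_pos h]
      have : ((c - step) ∈ S) := hR.mpr h
      simp only [this, decide_true, Bool.not_true, Bool.false_eq_true, if_false]
      exact ih start c hch'
    · rw [if_neg h]
      have : ¬ ((c - step) ∈ S) := fun hm => h (hR.mp hm)
      simp only [this, decide_false, Bool.not_false, if_true, List.map_cons]
      rw [← ih c c hch']

-- B's ends filter, through pvSegs
theorem pvEndsFilter (S : List Int) (step : Int) (l : List Int) :
    ∀ (start prev : Int),
    List.Chain (fun p c => (((p + step) ∈ S) ↔ c - p = step)) prev l →
    ¬ ((l.getLastD prev + step) ∈ S) →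
    (prev :: l).filter (fun f => !(decide ((f + step) ∈ S)))
      = (pvSegs step start prev l).map Prod.snd := by
  induction l with
  | nil =>
    intro start prev _ hlast
    simp only [List.getLastD_nil] at hlast
    simp [pvSegs, hlast]
  | cons c rest ih =>
    intro start prev hch hlast
    obtain ⟨hR, hch'⟩ := List.chain_cons.mp hch
    rw [List.getLastD_cons] at hlast
    simp only [pvSegs]
    rw [List.filter_cons]
    by_cases h : c - prev = step
    · rw [if_pos h]
      have hm : ((prev + step) ∈ S) := hR.mpr h
      simp only [hm, decide_true, Bool.not_true, Bool.false_eq_true, if_false]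
      exact ih start c hch' hlast
    · rw [if_neg h]
      have hm : ¬ ((prev + step) ∈ S) := fun hmm => h (hR.mp hmm)
      simp only [hm, decide_false, Bool.not_false, if_true, List.map_cons]
      rw [← ih c c hch' hlast]

theorem pvMaxSplit (m : Int) (r : List Int) (h : r ≠ []) :
    max (r.dropLast.foldl max m) (r.getLastD 0) = r.foldl max m := by
  conv_rhs => rw [← List.dropLast_append_getLast h]
  rw [List.foldl_append, List.getLastD_eq_getLast?, List.getLast?_eq_getLast_of_ne_nil h]
  simp

theorem pvFoldlMaxOne (r : List Int) (h : r ≠ []) (h1 : 1 ≤ r.headI) :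
    some (r.foldl max 1) = PySem.List.max? r (fun y => y) := by
  cases r with
  | nil => exact absurd rfl h
  | cons x t =>
    rw [PySem.List.max?_id_cons]
    have h1' : 1 ≤ x := h1
    simp only [List.foldl_cons]
    have : max 1 x = x := by omega
    rw [this]

-- ===== VERDICT (by name: the statement is the Claim_ definition above) =====
theorem summarize_frames_spec : Claim_equal_summarize_frames := by
  intro frames_seen _
  unfold Spec_summarize_frames summarize_frames summarize_frames_alt
  cases hf : PySem.List.sorted (PySem.Set.ofList frames_seen) (fun x => x) false with
  | nil =>
    have hs : PySem.Set.ofList frames_seen = [] := by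
      have := PySem.List.sorted_eq_nil_iff (xs := PySem.Set.ofList frames_seen)
        (key := fun x => x) (rev := false)
      exact (this.mp hf)
    simp [hs]
  | cons f rest =>
    have hsne : (PySem.Set.ofList frames_seen).isEmpty = false := by
      rcases h : PySem.Set.ofList frames_seen with _ | _
      · rw [h] at hf
        have : PySem.List.sorted ([] : List Int) (fun x => x) false = [] := rfl
        rw [this] at hf
        exact absurd hf (by simp)
      · simp
    simp only [hf, hsne, List.isEmpty_cons, Bool.false_eq_true, if_false]
    have hp : (f :: rest).Pairwise (· < ·) := by
      have := PySem.List.sorted_ofList_pairwise_lt (xs := frames_seen)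
      rwa [hf] at this
    obtain ⟨hstep, hdvd⟩ := pvStepFacts (f :: rest) hp
    set step := pvInferFrameStep (f :: rest) with hstepdef
    have hchain := pvChainMk (f :: rest) step hstep hp hdvd rest [] f (by simp)
    have hcont : ∀ x : Int,
        PySem.Set.contains (PySem.Set.ofList frames_seen) x = decide (x ∈ (f :: rest)) := by
      intro x
      have hmm : x ∈ (f :: rest) ↔ x ∈ PySem.Set.ofList frames_seen := by
        rw [← hf]
        exact PySem.List.mem_sorted (x := x) (xs := PySem.Set.ofList frames_seen)
          (key := fun x => x) (rev := false)
      rw [Bool.eq_iff_iff]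
      simp [hmm]
    have hheadmin : ∀ x ∈ (f :: rest), f ≤ x := by
      intro x hx
      rcases List.mem_cons.mp hx with h | h
      · omega
      · exact le_of_lt ((List.pairwise_cons.mp hp).1 x h)
    have hfirst : ¬ ((f - step) ∈ (f :: rest)) := fun hm => by
      have := hheadmin _ hm; omega
    have hlastno : ¬ ((rest.getLastD f + step) ∈ (f :: rest)) := fun hm => by
      have h1 := pvLeLast (f :: rest) _ hp hm
      rw [List.getLastD_cons] at h1
      omega
    set segs := pvSegs step f f rest with hsegs
    have hstarts : (f :: rest).filter
        (fun x => !(PySem.Set.contains (PySem.Set.ofList frames_seen) (x - step)))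
        = segs.map Prod.fst := by
      have hch1 := List.Chain.imp (fun a b (h : _ ∧ _) => h.1) hchain
      have := pvStartsFilter (f :: rest) step rest f f hch1
      rw [List.filter_cons]
      simp only [hcont, hfirst, decide_false, Bool.not_false, if_true]
      exact this
    have hends : (f :: rest).filter
        (fun x => !(PySem.Set.contains (PySem.Set.ofList frames_seen) (x + step)))
        = segs.map Prod.snd := by
      have hch2 := List.Chain.imp (fun a b (h : _ ∧ _) => h.2) hchain
      have := pvEndsFilter (f :: rest) step rest f f hch2 hlastno
      simp only [hcont]
      exact this
    have hzip : (segs.map Prod.fst).zip (segs.map Prod.snd) = segs := by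
      rw [List.zip_map']
      simp
    have hruns : pvRunsAux step f 1 rest
        = segs.map (fun be => PySem.Int.floordiv (be.2 - be.1) step + 1) :=
      pvRunsAux_eq_segs step (by omega) rest f f 1 (by ring)
    set r := pvRunsAux step f 1 rest with hr
    have hne : r ≠ [] := pvRunsAux_ne_nil step f 1 rest
    have hhd : 1 ≤ r.headI := pvRunsAux_headI step f 1 rest (by omega)
    have hA := pvLoopA step rest f 1 1 1
    simp only [List.drop_one, List.tail_cons]
    rw [hA, hstarts, hends, hzip, ← hruns, ← hr]
    have hlen : ((segs.map Prod.fst).length : Int) = (r.length : Int) := by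
      rw [hruns]; simp
    have h1 : (1 : Int) + (r.length : Int) - 1 = (r.length : Int) := by ring
    rw [h1, pvMaxSplit 1 r hne, ← pvFoldlMaxOne r hne hhd, hlen]
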